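-- pv_equiv track=rewrite | github.com/Leapense/problems | 23520번: Same Songs/gen.py | brute_force_best_k
-- ===== SOURCE A (Python) =====
-- from typing import List, Tuple
--
-- def brute_force_best_k(songs: List[int]) -> int:
--     n = len(songs)
--     best = 0
--     for mask in range(1 << n):
--         last = None
--         k = 0
--         for i in range(n):
--             if (mask >> i) & 1:
--                 ai = songs[i]
--                 if last is not None and ai == last:
--                     k += 1
--                 last = ai
--         if k > best:
--             best = k
--     return best
-- ===== SOURCE B (Python) =====
-- from typing import List
--
-- def brute_force_best_k(songs: List[int]) -> int:
--     # O(n) DP: best[v] = max adjacent-equal pairs of a subsequence ending in v;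
--     # mx = best over all subsequences so far.
--     best = {}
--     mx = 0
--     for x in songs:
--         v = best.get(x, -1) + 1
--         if mx > v:
--             v = mx
--         best[x] = v
--         if v > mx:
--             mx = v
--     return mx
-- ===== Notes on version B (the rewrite author's own statement) =====
-- stated objective: faster
-- what changed: Replaced the O(2^n * n) enumeration of all bitmask subsequences by a one-pass O(n) DP keeping, per value, the best adjacent-equal-pair count of a subsequence ending in that value plus a running overall maximum.
import Mathlib
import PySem

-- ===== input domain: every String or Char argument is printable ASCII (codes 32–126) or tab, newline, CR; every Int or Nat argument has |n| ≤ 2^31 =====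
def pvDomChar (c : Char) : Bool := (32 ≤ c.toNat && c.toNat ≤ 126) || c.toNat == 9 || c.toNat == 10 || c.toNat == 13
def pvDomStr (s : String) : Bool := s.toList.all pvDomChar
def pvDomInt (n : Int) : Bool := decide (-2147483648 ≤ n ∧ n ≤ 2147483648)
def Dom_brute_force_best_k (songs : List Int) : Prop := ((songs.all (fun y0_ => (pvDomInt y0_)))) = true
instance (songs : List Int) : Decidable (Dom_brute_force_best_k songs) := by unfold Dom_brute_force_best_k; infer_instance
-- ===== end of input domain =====

-- B replaces A's O(2^n · n) enumeration of all bitmask subsequences by a one-pass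
-- per-value DP with a running maximum (objective: faster, asymptotic).

-- ===== PORT A =====
-- literal port of A: outer loop over mask in range(1 << n), inner loop over i in
-- range(n) maintaining (last, k); songs[i] is ported as pyGetD with default 0 —
-- i always lies in range(n), so the default is never used.
def brute_force_best_k (songs : List Int) : Int :=
  (PySem.List.pyRange 0 ((1 : Int) <<< songs.length) 1).foldl
    (fun best mask =>
      let r := (PySem.List.pyRange 0 (songs.length : Int) 1).foldl
        (fun (st : Option Int × Int) i =>
          -- (mask >> i) & 1 : mask and i are ≥ 0 here, so Int >>> is Python's >>
          if PySem.Int.band (mask >>> (i.toNat : Int)) 1 = 1 then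
            let ai := PySem.List.pyGetD songs i 0
            -- 'last is not None and ai == last' is exactly st.1 = some ai
            (some ai, if st.1 = some ai then st.2 + 1 else st.2)
          else st)
        (none, 0)
      if r.2 > best then r.2 else best)
    0

-- ===== PORT B =====
-- literal port of B (Source B): dict best : value ↦ best pair count of a subsequence
-- ending in that value; mx = running overall maximum.
def brute_force_best_k_alt (songs : List Int) : Int :=
  (songs.foldl
    (fun (st : PySem.Dict Int Int × Int) x =>
      let v0 := st.1.getD x (-1) + 1
      let v := if st.2 > v0 then st.2 else v0
      (st.1.insert x v, if v > st.2 then v else st.2))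
    (PySem.Dict.empty, 0)).2

-- ===== PRECONDITION & SPEC =====
def Spec_brute_force_best_k (songs : List Int) (out : Int) : Prop := out = brute_force_best_k_alt songs
instance (songs : List Int) (out : Int) : Decidable (Spec_brute_force_best_k songs out) := by unfold Spec_brute_force_best_k; infer_instance

-- ===== CLAIM (what is proved, stated in full; the proofs are below) =====
def Claim_equal_brute_force_best_k : Prop := ∀ (songs : List Int), Dom_brute_force_best_k songs → Spec_brute_force_best_k songs (brute_force_best_k songs)

-- ===== LEMMAS AND PROOFS =====

-- pairsL last t = number of adjacent equal pairs of t, seeded with a previous element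
def pairsL : Option Int → List Int → Int
  | _, [] => 0
  | last, a :: u => (if last = some a then 1 else 0) + pairsL (some a) u

-- the subsequence of xs selected by the low bits of m (bit 0 ↔ head)
def subseq : List Int → Nat → List Int
  | [], _ => []
  | a :: t, m => if m % 2 = 1 then a :: subseq t (m / 2) else subseq t (m / 2)

-- all subsequences of xs, in mask order
def subs : List Int → List (List Int)
  | [] => [[]]
  | a :: t => (subs t).flatMap (fun u => [u, a :: u])

-- structural mirror of A's inner loop for mask m : Nat
def innerGo (m : Nat) : List Int → Option Int × Int → Option Int × Int
  | [], st => st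
  | a :: t, st =>
      innerGo (m / 2) t
        (if m % 2 = 1 then (some a, if st.1 = some a then st.2 + 1 else st.2) else st)

-- value contributed by a subsequence t of the remaining input, given DP state (d, mx)
def score (d : PySem.Dict Int Int) (mx : Int) : List Int → Int
  | [] => mx
  | b :: u => max (d.getD b (-1) + 1) mx + pairsL none (b :: u)

theorem innerGo_eq_pairsL (xs : List Int) : ∀ (m : Nat) (last : Option Int) (k : Int),
    (innerGo m xs (last, k)).2 = k + pairsL last (subseq xs m) := by
  induction xs with
  | nil => intro m last k; simp [innerGo, subseq, pairsL]
  | cons a t ih =>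
    intro m last k
    by_cases h : m % 2 = 1
    · simp [innerGo, subseq, h, ih, pairsL]; split_ifs <;> ring
    · simp [innerGo, subseq, h, ih]

theorem band_cast_one (k : Nat) :
    PySem.Int.band ((k : Nat) : Int) 1 = ((k % 2 : Nat) : Int) := by
  have h : PySem.Int.band ((k : Nat) : Int) 1 = ((k &&& 1 : Nat) : Int) := by
    exact_mod_cast PySem.Int.band_natCast k 1
  rw [h, Nat.and_one_is_mod]

theorem inner_fold_eq_innerGo (M : Int) (hM : 0 ≤ M) (xs : List Int) :
    ∀ (s : Nat) (st : Option Int × Int),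
    (PySem.List.enumerate xs (s : Int)).foldl
      (fun (st : Option Int × Int) (p : Int × Int) =>
        if PySem.Int.band (M >>> (p.1.toNat : Int)) 1 = 1 then
          (some p.2, if st.1 = some p.2 then st.2 + 1 else st.2)
        else st) st
    = innerGo (M.toNat >>> s) xs st := by
  induction xs with
  | nil => intro s st; simp [PySem.List.enumerate, innerGo]
  | cons a t ih =>
    intro s st
    rw [PySem.List.enumerate_cons, List.foldl_cons]
    have hs1 : ((s : Int) + 1) = ((s + 1 : Nat) : Int) := by push_cast; ring
    have hcond : (PySem.Int.band (M >>> ((((s : Int), a).1.toNat : Nat) : Int)) 1 = 1)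
        ↔ ((M.toNat >>> s) % 2 = 1) := by
      have h1 : ((((s : Int), a).1.toNat : Nat) : Int) = ((s : Nat) : Int) := by simp
      have h2 : PySem.Int.band (M >>> ((s : Nat) : Int)) 1 = (((M.toNat >>> s) % 2 : Nat) : Int) := by
        conv_lhs => rw [show M = ((M.toNat : Nat) : Int) from (Int.toNat_of_nonneg hM).symm]
        rw [Int.shiftRight_natCast, band_cast_one]
      rw [h1, h2]
      exact_mod_cast Iff.rfl
    have hdiv : (M.toNat >>> s) / 2 = M.toNat >>> (s + 1) := (Nat.shiftRight_succ M.toNat s).symm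
    by_cases h : (M.toNat >>> s) % 2 = 1
    · rw [if_pos (hcond.mpr h), hs1, ih (s+1)]
      show innerGo (M.toNat >>> (s+1)) t _ = innerGo (M.toNat >>> s) (a :: t) st
      rw [innerGo, if_pos h, hdiv]
    · rw [if_neg (fun hc => h (hcond.mp hc)), hs1, ih (s+1)]
      show innerGo (M.toNat >>> (s+1)) t st = innerGo (M.toNat >>> s) (a :: t) st
      rw [innerGo, if_neg h, hdiv]

theorem rangeTwoMul (N : Nat) :
    List.range (2 * N) = (List.range N).flatMap (fun m => [2 * m, 2 * m + 1]) := by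
  induction N with
  | zero => simp
  | succ n ih =>
    have h : 2 * (n + 1) = (2 * n) + 1 + 1 := by ring
    rw [h, List.range_succ, List.range_succ, List.range_succ, ih]
    simp

theorem map_subseq_range (xs : List Int) :
    (List.range (2 ^ xs.length)).map (subseq xs) = subs xs := by
  induction xs with
  | nil => simp [subs, subseq]
  | cons a t ih =>
    have h2 : 2 ^ (a :: t).length = 2 * 2 ^ t.length := by
      rw [List.length_cons, pow_succ]; ring
    rw [h2, rangeTwoMul, List.map_flatMap, subs, ← ih, List.flatMap_map]
    apply List.flatMap_congr
    intro m _
    have e1 : subseq (a :: t) (2 * m) = subseq t m := by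
      simp [subseq, Nat.mul_mod_right]
    have e2 : subseq (a :: t) (2 * m + 1) = a :: subseq t m := by
      have h1 : (2 * m + 1) % 2 = 1 := by omega
      have hd : (2 * m + 1) / 2 = m := by omega
      simp [subseq, h1, hd]
    simp [e1, e2]

theorem if_lt_eq_max (b k : Int) : (if b < k then k else b) = max b k := by
  rcases lt_or_ge b k with h | h
  · simp [h, max_eq_right h.le]
  · simp [not_lt.2 h, max_eq_left h]

theorem A_eq_max_pairs (songs : List Int) :
    brute_force_best_k songs = List.foldl max 0 ((subs songs).map (pairsL none)) := by
  unfold brute_force_best_k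
  have hinner : ∀ (M : Int), 0 ≤ M →
      ((PySem.List.pyRange 0 (songs.length : Int) 1).foldl
        (fun (st : Option Int × Int) i =>
          if PySem.Int.band (M >>> (i.toNat : Int)) 1 = 1 then
            (some (PySem.List.pyGetD songs i 0),
             if st.1 = some (PySem.List.pyGetD songs i 0) then st.2 + 1 else st.2)
          else st)
        (none, 0)).2 = pairsL none (subseq songs M.toNat) := by
    intro M hM
    have hen : (PySem.List.pyRange 0 (songs.length : Int) 1) =
        (PySem.List.pyRange 0 (PySem.List.len songs) 1) := by
      simp [PySem.List.len_eq]
    rw [hen]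
    have hmapped :
        (PySem.List.pyRange 0 (PySem.List.len songs) 1).foldl
          (fun (st : Option Int × Int) i =>
            if PySem.Int.band (M >>> (i.toNat : Int)) 1 = 1 then
              (some (PySem.List.pyGetD songs i 0),
               if st.1 = some (PySem.List.pyGetD songs i 0) then st.2 + 1 else st.2)
            else st)
          (none, 0)
        = (PySem.List.enumerate songs ((0 : Nat) : Int)).foldl
            (fun (st : Option Int × Int) (p : Int × Int) =>
              if PySem.Int.band (M >>> (p.1.toNat : Int)) 1 = 1 then
                (some p.2, if st.1 = some p.2 then st.2 + 1 else st.2)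
              else st) (none, 0) := by
      simp only [Nat.cast_zero]
      rw [PySem.List.enumerate_eq_map_pyRange songs 0, List.foldl_map]
    rw [hmapped, inner_fold_eq_innerGo M hM songs 0 (none, 0)]
    simpa using innerGo_eq_pairsL songs (M.toNat >>> 0) none 0
  refine (PySem.List.foldl_congr_mem _ _
      (fun (best : Int) (mask : Int) => max best (pairsL none (subseq songs mask.toNat)))
      _ ?_).trans ?_
  · intro acc mask hmem
    have h0 : 0 ≤ mask := ((PySem.List.mem_pyRange_one).mp hmem).1
    simp only [gt_iff_lt]
    rw [hinner mask h0]
    exact if_lt_eq_max acc (pairsL none (subseq songs mask.toNat))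
  · have hpow : (1 : Int) <<< songs.length = ((2 ^ songs.length : Nat) : Int) := by
      simp [Int.shiftLeft_eq]
    rw [hpow, PySem.List.pyRange_zero_nat, List.foldl_map,
      show List.foldl max 0 ((subs songs).map (pairsL none))
        = List.foldl (fun (best : Int) (m : Nat) => max best (pairsL none (subseq songs m)))
            0 (List.range (2 ^ songs.length)) by
        rw [← map_subseq_range, List.map_map, List.foldl_map]
        simp [Function.comp]]
    simp [Int.toNat_natCast]

theorem foldl_max_init_mem {l : List Int} {i j : Int} (hij : i ≤ j) (hj : j ∈ l) :
    List.foldl max i l = List.foldl max j l := by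
  apply le_antisymm
  · rcases PySem.List.foldl_max_mem l i with h | h
    · rw [h]; exact le_trans hij ((PySem.List.le_foldl_max l j).1)
    · exact (PySem.List.le_foldl_max l j).2 _ h
  · rcases PySem.List.foldl_max_mem l j with h | h
    · rw [h]; exact (PySem.List.le_foldl_max l i).2 _ hj
    · exact (PySem.List.le_foldl_max l i).2 _ h

theorem foldl_max_flatMap_pair (g h : List Int → Int) (L : List (List Int)) :
    ∀ i : Int, List.foldl max i (L.flatMap (fun u => [g u, h u]))
      = List.foldl max i (L.map (fun u => max (g u) (h u))) := by
  induction L with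
  | nil => intro i; simp
  | cons u L ih =>
    intro i
    simp only [List.flatMap_cons, List.map_cons, List.foldl_cons, List.cons_append,
      List.nil_append]
    rw [← ih, max_assoc]

theorem nil_mem_subs (s : List Int) : [] ∈ subs s := by
  induction s with
  | nil => simp [subs]
  | cons a t ih =>
    simp only [subs, List.mem_flatMap]
    exact ⟨[], ih, by simp⟩

theorem score_pointwise (d : PySem.Dict Int Int) (mx a : Int) (u : List Int) :
    max (score d mx u) (score d mx (a :: u))
      = score (d.insert a (max (d.getD a (-1) + 1) mx)) (max (d.getD a (-1) + 1) mx) u := by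
  cases u with
  | nil =>
    simp [score, pairsL]
  | cons b u' =>
    by_cases hba : b = a
    · subst hba
      simp [score, pairsL]
      ring
    · have hab : a ≠ b := fun h => hba h.symm
      simp [score, pairsL, PySem.Dict.getD_insert, hba, hab]

theorem dp_inv (s : List Int) : ∀ (d : PySem.Dict Int Int) (mx : Int),
    (s.foldl
      (fun (st : PySem.Dict Int Int × Int) x =>
        let v0 := st.1.getD x (-1) + 1
        let v := if st.2 > v0 then st.2 else v0
        (st.1.insert x v, if v > st.2 then v else st.2)) (d, mx)).2
    = List.foldl max mx ((subs s).map (score d mx)) := by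
  induction s with
  | nil => intro d mx; simp [subs, score]
  | cons a s' ih =>
    intro d mx
    rw [List.foldl_cons]
    simp only
    set v0 := d.getD a (-1) + 1 with hv0
    have hv : (if mx > v0 then mx else v0) = max v0 mx := by
      rcases lt_or_ge v0 mx with h | h
      · simp [h, max_eq_right h.le]
      · simp [not_lt.2 h, max_eq_left h]
    have hmx : (if (max v0 mx) > mx then (max v0 mx) else mx) = max v0 mx := by
      rcases lt_or_ge mx (max v0 mx) with h | h
      · simp [h]
      · have : max v0 mx = mx := le_antisymm h (le_max_right _ _)
        simp [this]
    rw [hv, hmx, ih (d.insert a (max v0 mx)) (max v0 mx)]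
    -- rewrite the RHS over subs (a :: s')
    rw [subs, List.map_flatMap]
    have hfm : ((subs s').flatMap fun u => List.map (score d mx) [u, a :: u])
        = (subs s').flatMap fun u => [score d mx u, score d mx (a :: u)] := by
      simp
    rw [hfm, foldl_max_flatMap_pair]
    have hpt : ((subs s').map fun u => max (score d mx u) (score d mx (a :: u)))
        = (subs s').map (score (d.insert a (max v0 mx)) (max v0 mx)) := by
      apply List.map_congr_left
      intro u _
      exact score_pointwise d mx a u
    rw [hpt]
    apply (foldl_max_init_mem (le_max_right v0 mx) _).symm
    have : score (d.insert a (max v0 mx)) (max v0 mx) [] = max v0 mx := rfl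
    rw [← this]
    exact List.mem_map_of_mem (nil_mem_subs s')

-- ===== VERDICT (by name: the statement is the Claim_ definition above) =====
theorem brute_force_best_k_spec : Claim_equal_brute_force_best_k := by
  intro songs _
  unfold Spec_brute_force_best_k brute_force_best_k_alt
  rw [A_eq_max_pairs, dp_inv]
  congr 1
  apply List.map_congr_left
  intro t _
  cases t with
  | nil => rfl
  | cons b u => simp [score, PySem.Dict.getD_empty]
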